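-- pv_equiv track=rewrite | github.com/CCCharlesChan/CS230Music | overlap.py | runlength_extract
-- ===== SOURCE A (Python) =====
-- def runlength_extract(a):
--     current = a[0]
--     val = 0
--     res = []
--     for el in a:
--         if current == el:
--             val += 1
--         else:
--             current = el
--             val = 1
--         res.append(val)
--     current = res[-1]
--     for el, i in zip(res[::-1], range(len(res))[::-1]):
--         if current == -1:
--             current = el
--         res[i] = current
--         if el == 1:
--             current = -1
--     return res
-- ===== SOURCE B (Python) =====
-- def runlength_extract(a):
--     res = []
--     i = 0
--     n = len(a)
--     while i < n:
--         j = i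
--         while j < n and a[j] == a[i]:
--             j += 1
--         L = j - i
--         res += [L] * L
--         i = j
--     return res
-- ===== Notes on version B (the rewrite author's own statement) =====
-- stated objective: simpler
-- what changed: A makes two passes (count positions within each run, then propagate each run's total length backwards through the list with a -1 sentinel); B makes one forward two-pointer pass that measures each run's length L and emits L copies of L directly.
import Mathlib
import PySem

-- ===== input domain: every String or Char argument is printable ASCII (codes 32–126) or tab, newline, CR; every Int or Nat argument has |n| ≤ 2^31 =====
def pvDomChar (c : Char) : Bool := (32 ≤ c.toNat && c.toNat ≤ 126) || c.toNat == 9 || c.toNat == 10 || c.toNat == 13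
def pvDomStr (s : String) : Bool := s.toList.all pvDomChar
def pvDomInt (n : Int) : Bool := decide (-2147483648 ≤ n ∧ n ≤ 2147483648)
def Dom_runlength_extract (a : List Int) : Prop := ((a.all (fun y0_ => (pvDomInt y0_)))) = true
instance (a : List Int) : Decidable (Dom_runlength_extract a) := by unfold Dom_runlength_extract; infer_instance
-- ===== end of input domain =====

-- B replaces A's two passes (position counting, then backward propagation of each run's
-- total length) by a single forward pass that emits L copies of L per run; objective: simpler.

-- ===== PORT A =====
-- body of A's first loop; state (current, val, res), 'res.append(val)' kept as list append
def rlStep1 (s : Int × Int × List Int) (el : Int) : Int × Int × List Int :=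
  if s.1 = el then (s.1, s.2.1 + 1, s.2.2 ++ [s.2.1 + 1])
  else (el, 1, s.2.2 ++ [1])

-- body of A's second loop; state (current, res), pair (el, i); 'res[i] = current' is List.set
def rlStep2 (s : Int × List Int) (p : Int × Int) : Int × List Int :=
  let current := if s.1 = -1 then p.1 else s.1
  (if p.1 = 1 then -1 else current, s.2.set p.2.toNat current)

def runlength_extract (a : List Int) : List Int :=
  match PySem.List.pyGet? a 0 with
  | none => []
  | some c0 =>
    let r := (a.foldl rlStep1 (c0, 0, [])).2.2
    let cur := (PySem.List.pyGet? r (-1)).getD 0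
    let pairs := r.reverse.zip ((PySem.List.pyRange 0 (r.length : Int) 1).reverse)
    (pairs.foldl rlStep2 (cur, r)).2

-- ===== PORT B =====
-- Source B's outer loop: k counts the current run (inner while), then L*[L] is emitted
def rlGo (x : Int) (k : Nat) : List Int → List Int
  | [] => List.replicate (k + 1) ((k : Int) + 1)
  | y :: ys =>
    if y = x then rlGo x (k + 1) ys
    else List.replicate (k + 1) ((k : Int) + 1) ++ rlGo y 0 ys

def runlength_extract_alt : List Int → List Int
  | [] => []
  | x :: xs => rlGo x 0 xs

-- ===== PRECONDITION & SPEC =====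
-- Pre_ excludes only the empty list, on which A raises IndexError at 'a[0]'.
def Pre_runlength_extract (a : List Int) : Prop := a ≠ []
instance (a : List Int) : Decidable (Pre_runlength_extract a) := by unfold Pre_runlength_extract; infer_instance
def pvWitness_runlength_extract : List Int := [1, 1, 2]

def Spec_runlength_extract (a : List Int) (out : List Int) : Prop := out = runlength_extract_alt a
instance (a : List Int) (out : List Int) : Decidable (Spec_runlength_extract a out) := by unfold Spec_runlength_extract; infer_instance

-- ===== CLAIM (what is proved, stated in full; the proofs are below) =====
def Claim_equal_runlength_extract : Prop := ∀ (a : List Int), Dom_runlength_extract a → Pre_runlength_extract a → Spec_runlength_extract a (runlength_extract a)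

-- ===== LEMMAS AND PROOFS =====
lemma foldl1_res (t : List Int) (c v : Int) (res : List Int) :
    t.foldl rlStep1 (c, v, res) =
      ((t.foldl rlStep1 (c, v, [])).1, (t.foldl rlStep1 (c, v, [])).2.1,
        res ++ (t.foldl rlStep1 (c, v, [])).2.2) := by
  induction t generalizing c v res with
  | nil => simp
  | cons el t ih =>
    simp only [List.foldl_cons, rlStep1]
    by_cases h : c = el <;> simp [h] <;>
      rw [ih _ _ (res ++ _), ih _ _ ([_])] <;> simp

def rlBlockFrom (v : Int) (n : Nat) : List Int :=
  (List.range n).map (fun i : Nat => v + 1 + (i : Int))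

lemma foldl1_replicate (n : Nat) (x v : Int) :
    (List.replicate n x).foldl rlStep1 (x, v, []) = (x, v + n, rlBlockFrom v n) := by
  induction n generalizing v with
  | zero => simp [rlBlockFrom]
  | succ n ih =>
    rw [List.replicate_succ]
    simp only [List.foldl_cons, rlStep1, if_true, List.nil_append]
    rw [foldl1_res, ih]
    refine Prod.ext rfl (Prod.ext (by push_cast; ring) ?_)
    simp only [rlBlockFrom, List.range_succ_eq_map, List.map_cons, List.map_map]
    simp only [List.singleton_append, List.cons.injEq, Nat.cast_zero]
    refine ⟨by ring, ?_⟩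
    apply List.map_congr_left
    intro i _
    simp [Function.comp, Nat.succ_eq_add_one]
    ring

lemma foldl1_reset (y c v : Int) (t : List Int) (h : y ≠ c) :
    (y :: t).foldl rlStep1 (c, v, []) = (y :: t).foldl rlStep1 (y, 0, []) := by
  simp only [List.foldl_cons, rlStep1]
  rw [if_neg (fun hc => h hc.symm)]
  norm_num

def rlCountRun (x : Int) : List Int → Nat
  | [] => 0
  | y :: ys => if y = x then rlCountRun x ys + 1 else 0

lemma rlCountRun_le (x : Int) (ys : List Int) : rlCountRun x ys ≤ ys.length := by
  induction ys with
  | nil => simp [rlCountRun]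
  | cons y ys ih =>
    simp only [rlCountRun]
    split
    · simp; omega
    · simp

lemma countRun_split (x : Int) (xs : List Int) :
    x :: xs = List.replicate (rlCountRun x xs + 1) x ++ xs.drop (rlCountRun x xs) := by
  induction xs generalizing x with
  | nil => simp [rlCountRun]
  | cons y ys ih =>
    by_cases h : y = x
    · subst h
      simp only [rlCountRun, if_true]
      rw [List.replicate_succ]
      simpa using ih y
    · simp [rlCountRun, h]

lemma countRun_drop_head (x : Int) (xs : List Int) :
    (xs.drop (rlCountRun x xs)).head? ≠ some x := by
  induction xs generalizing x with
  | nil => simp [rlCountRun]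
  | cons y ys ih =>
    by_cases h : y = x
    · subst h; simpa [rlCountRun] using ih y
    · simp [rlCountRun, h]

def rlBlock (n : Nat) : List Int := rlBlockFrom 0 n

def rlRuns : List Int → List Int
  | [] => []
  | x :: xs => rlBlock (rlCountRun x xs + 1) ++ rlRuns (xs.drop (rlCountRun x xs))
termination_by a => a.length
decreasing_by
  have := rlCountRun_le x xs
  simp only [List.length_drop, List.length_cons]; omega

lemma pass1_eq_runs (n : Nat) : ∀ (x : Int) (xs : List Int), xs.length ≤ n →
    (((x :: xs).foldl rlStep1 (x, 0, [])).2.2 : List Int) = rlRuns (x :: xs) := by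
  induction n with
  | zero =>
    intro x xs hl
    have hx : xs = [] := by cases xs <;> simp_all
    subst hx
    simp [rlStep1, rlRuns, rlBlock, rlBlockFrom, rlCountRun, List.range_succ]
  | succ n ih =>
    intro x xs hl
    set k := rlCountRun x xs with hk
    have hsplit := countRun_split x xs
    have hfold := List.foldl_append (f := rlStep1) (b := ((x : Int), (0 : Int), ([] : List Int)))
      (l := List.replicate (k + 1) x) (l' := xs.drop k)
    rw [← hsplit] at hfold
    rw [hfold, foldl1_replicate]
    have hruns : rlRuns (x :: xs) = rlBlock (k + 1) ++ rlRuns (xs.drop k) := by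
      rw [hk]; simp [rlRuns]
    rcases hrest : xs.drop k with _ | ⟨y, t⟩
    · rw [hruns, hrest]
      simp [rlRuns, rlBlock]
    · have hy : y ≠ x := by
        have := countRun_drop_head x xs
        rw [hrest] at this; simpa using this
      rw [foldl1_res, foldl1_reset y x _ t hy]
      have hlt : t.length + 1 ≤ n + 1 := by
        have : (xs.drop k).length ≤ xs.length := by simp
        rw [hrest] at this; simp at this; omega
      have hlen : t.length ≤ n := by omega
      have hIH := ih y t hlen
      rw [hruns, hrest]
      simp only [List.foldl_cons] at hIH ⊢
      rw [hIH]
      simp [rlBlock]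

lemma rlRuns_ne_nil (x : Int) (xs : List Int) : rlRuns (x :: xs) ≠ [] := by
  have : rlRuns (x :: xs) = rlBlock (rlCountRun x xs + 1) ++ rlRuns (xs.drop (rlCountRun x xs)) := by
    simp [rlRuns]
  rw [this]
  simp [rlBlock, rlBlockFrom, List.range_succ]

def rlBack (c : Int) : List Int → List Int × Int
  | [] => ([], c)
  | el :: t =>
    let c1 := if c = -1 then el else c
    let r := rlBack (if el = 1 then -1 else c1) t
    (c1 :: r.1, r.2)

lemma rlBack_append (c : Int) (u v : List Int) :
    rlBack c (u ++ v) =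
      ((rlBack c u).1 ++ (rlBack (rlBack c u).2 v).1, (rlBack (rlBack c u).2 v).2) := by
  induction u generalizing c with
  | nil => simp [rlBack]
  | cons el t ih => simp [rlBack, ih]

lemma rlBack_block (m : Nat) (Lc : Int) (hm : 1 ≤ m) (hc : Lc ≠ -1) :
    rlBack Lc (rlBlock m).reverse = (List.replicate m Lc, -1) := by
  induction m with
  | zero => omega
  | succ m ih =>
    have hb : rlBlock (m + 1) = rlBlock m ++ [(m : Int) + 1] := by
      simp [rlBlock, rlBlockFrom, List.range_succ]
      ring
    rcases Nat.eq_zero_or_pos m with hm0 | hm1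
    · subst hm0
      simp [rlBlock, rlBlockFrom, rlBack, hc]
    · rw [hb, List.reverse_append]
      simp only [List.reverse_singleton, List.singleton_append, rlBack]
      rw [if_neg hc]
      have hne1 : ((m : Int) + 1) ≠ 1 := by omega
      rw [if_neg hne1, ih (by omega)]
      simp [List.replicate_succ]

lemma rlBack_neg_one (x : Int) (t : List Int) (h : x ≠ -1) :
    rlBack (-1) (x :: t) = rlBack x (x :: t) := by
  simp [rlBack, h]

lemma rlBlock_succ (m : Nat) : rlBlock (m + 1) = rlBlock m ++ [(m : Int) + 1] := by
  simp [rlBlock, rlBlockFrom, List.range_succ]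
  ring

lemma rlBlock_rev_cons (m : Nat) :
    (rlBlock (m + 1)).reverse = ((m : Int) + 1) :: (rlBlock m).reverse := by
  rw [rlBlock_succ]; simp

lemma rlBack_block' (m : Nat) (c : Int) (hc : c = -1 ∨ c = (m : Int) + 1) :
    rlBack c (rlBlock (m + 1)).reverse = (List.replicate (m + 1) ((m : Int) + 1), -1) := by
  have hne : ((m : Int) + 1) ≠ -1 := by omega
  rcases hc with hc | hc
  · subst hc
    rw [rlBlock_rev_cons, rlBack_neg_one _ _ hne, ← rlBlock_rev_cons]
    exact rlBack_block (m + 1) _ (by omega) hne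
  · subst hc
    exact rlBack_block (m + 1) _ (by omega) hne

def rlExpand : List Int → List Int
  | [] => []
  | x :: xs => List.replicate (rlCountRun x xs + 1) ((rlCountRun x xs : Int) + 1)
      ++ rlExpand (xs.drop (rlCountRun x xs))
termination_by a => a.length
decreasing_by
  have := rlCountRun_le x xs
  simp only [List.length_drop, List.length_cons]; omega

lemma rlGo_eq (ys : List Int) : ∀ (x : Int) (k : Nat),
    rlGo x k ys = List.replicate (k + rlCountRun x ys + 1) (((k : Int) + rlCountRun x ys) + 1)
      ++ rlExpand (ys.drop (rlCountRun x ys)) := by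
  induction ys with
  | nil => intro x k; simp [rlGo, rlCountRun, rlExpand]
  | cons y ys ih =>
    intro x k
    by_cases h : y = x
    · subst h
      simp only [rlGo, rlCountRun, if_true, List.drop_succ_cons]
      rw [ih y (k + 1)]
      congr 2
      · omega
      · push_cast; ring
    · simp only [rlGo, if_neg h, rlCountRun]
      rw [ih y 0]
      have hexp : rlExpand (y :: ys) = List.replicate (rlCountRun y ys + 1) ((rlCountRun y ys : Int) + 1)
          ++ rlExpand (ys.drop (rlCountRun y ys)) := by simp [rlExpand]
      simp [hexp]

lemma alt_eq_expand (a : List Int) : runlength_extract_alt a = rlExpand a := by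
  rcases a with _ | ⟨x, xs⟩
  · simp [runlength_extract_alt, rlExpand]
  · simp only [runlength_extract_alt]
    rw [rlGo_eq]
    have : rlExpand (x :: xs) = List.replicate (rlCountRun x xs + 1) ((rlCountRun x xs : Int) + 1)
        ++ rlExpand (xs.drop (rlCountRun x xs)) := by simp [rlExpand]
    rw [this]
    simp

lemma rlBack_runs (n : Nat) : ∀ (x : Int) (xs : List Int), xs.length ≤ n → ∀ c : Int,
    (c = -1 ∨ (rlRuns (x :: xs)).getLast? = some c) →
    rlBack c (rlRuns (x :: xs)).reverse = ((rlExpand (x :: xs)).reverse, -1) := by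
  induction n with
  | zero =>
    intro x xs hl c hc
    have hx : xs = [] := by cases xs <;> simp_all
    subst hx
    have hruns : rlRuns [x] = rlBlock 1 := by simp [rlRuns, rlCountRun, rlBlock]
    have hexp : rlExpand [x] = [1] := by simp [rlExpand, rlCountRun]
    rw [hruns, hexp]
    rw [hruns] at hc
    have hc' : c = -1 ∨ c = (0 : Int) + 1 := by
      rcases hc with h | h
      · exact Or.inl h
      · right
        simp [rlBlock, rlBlockFrom] at h
        omega
    have := rlBack_block' 0 c (by simpa using hc')
    simpa using this
  | succ n ih =>
    intro x xs hl c hc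
    set k := rlCountRun x xs with hk
    have hruns : rlRuns (x :: xs) = rlBlock (k + 1) ++ rlRuns (xs.drop k) := by
      rw [hk]; simp [rlRuns]
    have hexp : rlExpand (x :: xs) = List.replicate (k + 1) ((k : Int) + 1) ++ rlExpand (xs.drop k) := by
      rw [hk]; simp [rlExpand]
    rcases hrest : xs.drop k with _ | ⟨y, t⟩
    · rw [hruns, hrest] at hc ⊢
      rw [hexp, hrest]
      simp only [List.append_nil, rlRuns, rlExpand] at hc ⊢
      have hc' : c = -1 ∨ c = (k : Int) + 1 := by
        rcases hc with h | h
        · exact Or.inl h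
        · right
          rw [rlBlock_succ] at h
          simp at h
          omega
      rw [rlBack_block' k c hc']
      simp
    · rw [hruns, hrest] at hc ⊢
      rw [hexp, hrest]
      rw [List.reverse_append, rlBack_append]
      have hlt : t.length ≤ n := by
        have : (xs.drop k).length ≤ xs.length := by simp
        rw [hrest] at this; simp at this; omega
      have hc2 : c = -1 ∨ (rlRuns (y :: t)).getLast? = some c := by
        rcases hc with h | h
        · exact Or.inl h
        · right
          rw [List.getLast?_append_of_ne_nil _ (rlRuns_ne_nil y t)] at h
          exact h
      rw [ih y t hlt c hc2]
      rw [rlBack_block' k (-1) (Or.inl rfl)]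
      simp

lemma drop_set_eq_cons (l : List Int) (i : Nat) (a : Int) (h : i < l.length) :
    (l.set i a).drop i = a :: l.drop (i+1) := by
  rw [List.drop_set, if_neg (by omega), Nat.sub_self,
    List.drop_eq_getElem_cons h, List.set_cons_zero]

lemma foldl2_set (v : List Int) : ∀ (k : Nat) (res : List Int) (c : Int),
    k + v.length ≤ res.length →
    (((v.zip ((List.range' k v.length).map (fun j : Nat => (j : Int)))).reverse).foldl rlStep2 (c, res)).2
      = res.take k ++ ((rlBack c v.reverse).1).reverse ++ res.drop (k + v.length) := by
  induction v using List.reverseRecOn with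
  | nil => intro k res c h; simp [rlBack]
  | append_singleton v x ih =>
    intro k res c h
    rw [List.length_append, List.length_singleton, List.range'_1_concat]
    set m := v.length with hm
    have hlen : m ≤ res.length ∧ k + m < res.length := by
      simp only [List.length_append, List.length_singleton] at h; omega
    rw [List.map_append, List.zip_append (by simp [hm])]
    simp only [List.map_singleton, List.zip_cons_cons, List.zip_nil_right]
    rw [List.reverse_append]
    simp only [List.reverse_singleton, List.singleton_append, List.foldl_cons]
    have hstep : rlStep2 (c, res) (x, ((k + m : Nat) : Int)) =
        (if x = 1 then -1 else if c = -1 then x else c,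
          res.set (k + m) (if c = -1 then x else c)) := by
      have hn : ((k : Int) + (m : Int)).toNat = k + m := by omega
      simp [rlStep2, hn]
    rw [hstep]
    rw [ih k _ _ (by simp; omega)]
    set c1 : Int := if c = -1 then x else c with hc1
    set c2 : Int := if x = 1 then -1 else c1 with hc2
    rw [List.take_set_of_le (by omega), drop_set_eq_cons _ _ _ (by omega)]
    have hback : rlBack c (v ++ [x]).reverse = (c1 :: (rlBack c2 v.reverse).1, (rlBack c2 v.reverse).2) := by
      rw [List.reverse_append]
      simp only [List.reverse_singleton, List.singleton_append, rlBack]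
      rw [← hc1, ← hc2]
    rw [hback]
    simp only [List.reverse_cons]
    rw [Nat.add_assoc]
    simp [List.append_assoc]

theorem main (x : Int) (xs : List Int) :
    runlength_extract (x :: xs) = runlength_extract_alt (x :: xs) := by
  rw [alt_eq_expand]
  simp only [runlength_extract, PySem.List.pyGet?_zero_cons]
  have hr : ((x :: xs).foldl rlStep1 (x, 0, [])).2.2 = rlRuns (x :: xs) :=
    pass1_eq_runs xs.length x xs le_rfl
  rw [hr]
  set r := rlRuns (x :: xs) with hrr
  have hne : r ≠ [] := rlRuns_ne_nil x xs
  have hcur : PySem.List.pyGet? r (-1) = r.getLast? := PySem.List.pyGet?_neg_one r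
  obtain ⟨l, hl⟩ : ∃ l, r.getLast? = some l := by
    rcases hx : r.getLast? with _ | l
    · exact absurd (List.getLast?_eq_none_iff.mp hx) hne
    · exact ⟨l, rfl⟩
  rw [hcur, hl]
  simp only [Option.getD_some]
  have hidx : PySem.List.pyRange 0 (r.length : Int) 1
      = (List.range' 0 r.length).map (fun j : Nat => (j : Int)) := by
    rw [PySem.List.pyRange_one]
    simp [List.range_eq_range']
  have hlen : ((List.range' 0 r.length).map (fun j : Nat => (j : Int))).length = r.length := by
    simp
  have hzip : r.reverse.zip (((List.range' 0 r.length).map (fun j : Nat => (j : Int))).reverse)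
      = (r.zip ((List.range' 0 r.length).map (fun j : Nat => (j : Int)))).reverse := by
    simp [List.zip_eq_zipWith, List.reverse_zipWith hlen.symm]
  rw [hidx, hzip, foldl2_set r 0 r l (by simp)]
  rw [rlBack_runs xs.length x xs le_rfl l (Or.inr hl)]
  simp

-- ===== VERDICT (by name: the statement is the Claim_ definition above) =====
theorem runlength_extract_spec : Claim_equal_runlength_extract := by
  intro a _ hpre
  unfold Spec_runlength_extract
  rcases a with _ | ⟨x, xs⟩
  · exact absurd rfl hpre
  · exact main x xs
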